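-- pv_equiv track=rewrite | github.com/mindbomber/Alignment-Aware-Neural-Architecture--AANA- | eval_pipeline/adapter_runner/verifier_modules/privacy_pii_v2.py | _window_value
-- ===== SOURCE A (Python) =====
-- def _window_value(text: str, start: int, max_chars: int = 90) -> tuple[int, int, str]:
--     end = min(len(text), start + max_chars)
--     window = text[start:end]
--     stop_positions = [pos for pos in [window.find("\n"), window.find("."), window.find(";")] if pos >= 0]
--     if stop_positions:
--         end = start + min(stop_positions)
--     value = text[start:end].strip(" :,-\t")
--     return start, end, value
-- ===== SOURCE B (Python) =====
-- def _window_value(text: str, start: int, max_chars: int = 90) -> tuple[int, int, str]: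
--     end = min(len(text), start + max_chars)
--     i = start
--     for c in text[start:end]:
--         if c in "\n.;":
--             end = i
--             break
--         i += 1
--     chars = list(text[start:end])
--     lo, hi = 0, len(chars)
--     while lo < hi and chars[lo] in " :,-\t":
--         lo += 1
--     while lo < hi and chars[hi - 1] in " :,-\t":
--         hi -= 1
--     return start, end, "".join(chars[lo:hi])
-- ===== Notes on version B (the rewrite author's own statement) =====
-- stated objective: alternative
-- what changed: Replaces the three window.find scans + filter + min selection and the library strip with one counting loop with early break to locate the cut point and a hand-written two-pointer trim over a char list.
import Mathlib
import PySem

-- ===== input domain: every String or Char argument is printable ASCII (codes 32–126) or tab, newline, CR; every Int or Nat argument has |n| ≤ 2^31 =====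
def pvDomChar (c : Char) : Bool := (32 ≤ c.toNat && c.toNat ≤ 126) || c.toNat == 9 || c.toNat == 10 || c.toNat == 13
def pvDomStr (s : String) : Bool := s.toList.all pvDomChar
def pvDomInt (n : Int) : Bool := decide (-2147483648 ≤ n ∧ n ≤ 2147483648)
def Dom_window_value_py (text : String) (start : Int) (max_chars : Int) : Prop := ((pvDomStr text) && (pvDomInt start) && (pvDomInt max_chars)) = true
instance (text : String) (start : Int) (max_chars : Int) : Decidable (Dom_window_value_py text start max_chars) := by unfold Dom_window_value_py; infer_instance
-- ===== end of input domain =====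

-- B replaces A's three window.find scans + filter + min selection and the library strip with a
-- single counting loop (early break at the first stop char) and a hand-written two-pointer trim
-- over the char list (alternative decomposition, same O(n) cost).

-- ===== PORT A =====
def window_value_py (text : String) (start : Int) (max_chars : Int) : Int × Int × String :=
  let end0 : Int := min (PySem.Str.len text) (start + max_chars)
  let window : String := PySem.Str.slice text (some start) (some end0)
  let stops : List Int :=
    [PySem.Str.find window "\n", PySem.Str.find window ".", PySem.Str.find window ";"].filter
      (fun pos => decide (0 ≤ pos))
  let endF : Int :=
    match PySem.List.min? stops (fun x => x) with
    | some m => start + m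
    | none => end0
  (start, endF, PySem.Str.stripChars (PySem.Str.slice text (some start) (some endF)) " :,-\t")

-- ===== PORT B =====
-- c in "\n.;"
def pvStop (c : Char) : Bool := c == '\n' || c == '.' || c == ';'
-- c in " :,-\t"  (written right-nested to mirror the short-circuit chain)
def pvStripC (c : Char) : Bool := c == ' ' || (c == ':' || (c == ',' || (c == '-' || c == '\t')))

-- the `for c in window` loop with counter i and early break: returns the final `end`
def pvCut : List Char → Int → Int → Int
  | [], _, e => e
  | c :: cs, i, e => if pvStop c then i else pvCut cs (i + 1) e

-- while lo < hi and chars[lo] in " :,-\t": lo += 1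
def pvTrimLo (chars : List Char) (lo hi : Nat) : Nat :=
  if _h : lo < hi then
    if pvStripC (chars.getD lo ' ') then pvTrimLo chars (lo + 1) hi else lo
  else lo
termination_by hi - lo

-- while lo < hi and chars[hi-1] in " :,-\t": hi -= 1
def pvTrimHi (chars : List Char) (lo hi : Nat) : Nat :=
  if _h : lo < hi then
    if pvStripC (chars.getD (hi - 1) ' ') then pvTrimHi chars lo (hi - 1) else hi
  else hi
termination_by hi - lo

def window_value_py_alt (text : String) (start : Int) (max_chars : Int) : Int × Int × String :=
  let end0 : Int := min (PySem.Str.len text) (start + max_chars)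
  let endF : Int := pvCut (PySem.Str.slice text (some start) (some end0)).toList start end0
  let chars : List Char := (PySem.Str.slice text (some start) (some endF)).toList
  let lo : Nat := pvTrimLo chars 0 chars.length
  let hi : Nat := pvTrimHi chars lo chars.length
  (start, endF, String.ofList (PySem.List.slice chars (some (lo : Int)) (some (hi : Int))))

-- ===== PRECONDITION & SPEC =====
def Spec_window_value_py (text : String) (start : Int) (max_chars : Int) (out : Int × Int × String) : Prop := out = window_value_py_alt text start max_chars
instance (text : String) (start : Int) (max_chars : Int) (out : Int × Int × String) : Decidable (Spec_window_value_py text start max_chars out) := by unfold Spec_window_value_py; infer_instance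

-- ===== CLAIM (what is proved, stated in full; the proofs are below) =====
def Claim_equal_window_value_py : Prop := ∀ (text : String) (start : Int) (max_chars : Int), Dom_window_value_py text start max_chars → Spec_window_value_py text start max_chars (window_value_py text start max_chars)

-- ===== LEMMAS AND PROOFS =====

theorem pv_singleton_prefix_iff_head (c : Char) (l : List Char) : [c] <+: l ↔ l.head? = some c := by
  cases l with
  | nil => simp
  | cons b bs => simp [List.cons_prefix_cons, eq_comm]

theorem pv_singleton_infix_iff_mem (c : Char) (l : List Char) : [c] <:+: l ↔ c ∈ l := by
  constructor
  · intro h; exact h.subset (List.mem_singleton_self c)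
  · intro h
    obtain ⟨s, t, rfl⟩ := List.append_of_mem h
    exact ⟨s, t, by simp⟩

theorem pv_find_singleton_eq (w : List Char) (c : Char) (i : Nat)
    (hi : w[i]? = some c) (hmin : ∀ j < i, w[j]? ≠ some c) :
    PySem.Chars.find w [c] = (i : Int) := by
  have hmem : c ∈ w := List.mem_of_getElem? hi
  have hnn : 0 ≤ PySem.Chars.find w [c] :=
    (PySem.Chars.find_nonneg_iff w [c]).mpr ((pv_singleton_infix_iff_mem c w).mpr hmem)
  obtain ⟨hpre, hlt⟩ := PySem.Chars.find_spec hnn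
  have hkc : w[(PySem.Chars.find w [c]).toNat]? = some c := by
    have := (pv_singleton_prefix_iff_head c _).mp hpre
    rwa [List.head?_drop] at this
  have h1 : ¬ i < (PySem.Chars.find w [c]).toNat := by
    intro h
    exact hlt i h ((pv_singleton_prefix_iff_head c _).mpr (by rw [List.head?_drop]; exact hi))
  have h2 : ¬ (PySem.Chars.find w [c]).toNat < i := fun h => hmin _ h hkc
  omega

theorem pv_mainEq (w : List Char) :
    PySem.List.min?
      (([PySem.Chars.find w ['\n'], PySem.Chars.find w ['.'], PySem.Chars.find w [';']]).filter
        (fun pos => decide (0 ≤ pos))) (fun x => x)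
      = (List.findIdx? pvStop w).map (fun i => (i : Int)) := by
  cases hidx : List.findIdx? pvStop w with
  | none =>
    have hall := List.findIdx?_eq_none_iff.mp hidx
    have hf : ∀ c : Char, pvStop c = true → PySem.Chars.find w [c] = -1 := by
      intro c hc
      rw [PySem.Chars.find_eq_neg_one_iff]
      intro hinf
      have := hall c ((pv_singleton_infix_iff_mem c w).mp hinf)
      simp [this] at hc
    rw [hf '\n' (by decide), hf '.' (by decide), hf ';' (by decide)]
    have hfilt : ([(-1 : Int), -1, -1]).filter (fun pos => decide (0 ≤ pos)) = [] := by decide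
    rw [hfilt]
    simp [PySem.List.min?_eq_none_iff]
  | some i =>
    obtain ⟨hlen, hp, hmin⟩ := List.findIdx?_eq_some_iff_getElem.mp hidx
    have hques : w[i]? = some w[i] := List.getElem?_eq_getElem hlen
    have hfc0 : PySem.Chars.find w [w[i]] = (i : Int) := by
      apply pv_find_singleton_eq w _ i hques
      intro j hj hq
      obtain ⟨hjl, hje⟩ := List.getElem?_eq_some_iff.mp hq
      exact hmin j hj (by rw [hje]; exact hp)
    have hc0mem : w[i] = '\n' ∨ w[i] = '.' ∨ w[i] = ';' := by
      have := hp
      simp [pvStop] at this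
      tauto
    have hIn : (i : Int) ∈ [PySem.Chars.find w ['\n'], PySem.Chars.find w ['.'], PySem.Chars.find w [';']] := by
      rcases hc0mem with h | h | h <;> rw [h] at hfc0 <;> simp [hfc0]
    have hInF : (i : Int) ∈
        ([PySem.Chars.find w ['\n'], PySem.Chars.find w ['.'], PySem.Chars.find w [';']]).filter
          (fun pos => decide (0 ≤ pos)) :=
      List.mem_filter.mpr ⟨hIn, by simp⟩
    have hLB : ∀ m ∈ ([PySem.Chars.find w ['\n'], PySem.Chars.find w ['.'], PySem.Chars.find w [';']]).filter
        (fun pos => decide (0 ≤ pos)), (i : Int) ≤ m := by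
      intro m hm
      obtain ⟨hm3, hnn'⟩ := List.mem_filter.mp hm
      have hnn : (0 : Int) ≤ m := by simpa using hnn'
      have key : ∀ c : Char, pvStop c = true → m = PySem.Chars.find w [c] → (i : Int) ≤ m := by
        intro c hc hmc
        have hnn2 : 0 ≤ PySem.Chars.find w [c] := hmc ▸ hnn
        obtain ⟨hpre, _⟩ := PySem.Chars.find_spec hnn2
        have hkc : w[(PySem.Chars.find w [c]).toNat]? = some c := by
          have := (pv_singleton_prefix_iff_head c _).mp hpre
          rwa [List.head?_drop] at this
        obtain ⟨hkl, hke⟩ := List.getElem?_eq_some_iff.mp hkc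
        have : ¬ (PySem.Chars.find w [c]).toNat < i := by
          intro h
          exact hmin _ h (by rw [hke]; exact hc)
        omega
      have hcases : m = PySem.Chars.find w ['\n'] ∨ m = PySem.Chars.find w ['.'] ∨ m = PySem.Chars.find w [';'] := by
        simpa using hm3
      rcases hcases with h | h | h
      · exact key '\n' (by decide) h
      · exact key '.' (by decide) h
      · exact key ';' (by decide) h
    cases hmq : PySem.List.min?
        (([PySem.Chars.find w ['\n'], PySem.Chars.find w ['.'], PySem.Chars.find w [';']]).filter
          (fun pos => decide (0 ≤ pos))) (fun x => x) with
    | none =>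
      exact absurd ((PySem.List.min?_eq_none_iff _ _).mp hmq) (List.ne_nil_of_mem hInF)
    | some m =>
      have h1 := PySem.List.min?_isMin hmq _ hInF
      have h2 := hLB m (PySem.List.min?_mem hmq)
      show (some m : Option Int) = some ((i : Nat) : Int)
      congr 1
      omega

theorem pv_cut_eq (w : List Char) : ∀ (s e0 : Int),
    pvCut w s e0 = (match List.findIdx? pvStop w with
      | some i => s + (i : Int)
      | none => e0) := by
  induction w with
  | nil => intro s e0; simp [pvCut]
  | cons c cs ih =>
    intro s e0
    rw [List.findIdx?_cons]
    by_cases hc : pvStop c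
    · simp [pvCut, hc]
    · simp only [pvCut, hc, if_neg, Bool.false_eq_true, not_false_iff, ih]
      cases List.findIdx? pvStop cs with
      | none => simp
      | some i => simp; ring

-- A's end expression equals B's pvCut over the same window
theorem pv_endEq (w : List Char) (s e0 : Int) :
    (match PySem.List.min?
        (([PySem.Chars.find w ['\n'], PySem.Chars.find w ['.'], PySem.Chars.find w [';']]).filter
          (fun pos => decide (0 ≤ pos))) (fun x => x) with
      | some m => s + m
      | none => e0)
    = pvCut w s e0 := by
  rw [pv_mainEq, pv_cut_eq]
  cases List.findIdx? pvStop w <;> simp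

theorem pv_stripC_eq (c : Char) : (" :,-\t".toList.contains c) = pvStripC c := by
  show ([' ', ':', ',', '-', '\t'].contains c) = pvStripC c
  by_cases h1 : c = ' ' <;> by_cases h2 : c = ':' <;> by_cases h3 : c = ',' <;>
    by_cases h4 : c = '-' <;> by_cases h5 : c = '\t' <;>
    simp [pvStripC, h1, h2, h3, h4, h5]

theorem pv_dropWhile_eq_drop (p : Char → Bool) (l : List Char) :
    l.dropWhile p = l.drop (l.takeWhile p).length := by
  induction l with
  | nil => rfl
  | cons c cs ih =>
    by_cases hc : p c <;> simp [hc, ih]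

theorem pv_trimLo_eq (l : List Char) : ∀ (n lo : Nat), l.length - lo = n → lo ≤ l.length →
    pvTrimLo l lo l.length = lo + ((l.drop lo).takeWhile pvStripC).length := by
  intro n
  induction n with
  | zero =>
    intro lo hn hle
    have : lo = l.length := by omega
    subst this
    rw [pvTrimLo]
    simp
  | succ m ih =>
    intro lo hn hle
    have hlt : lo < l.length := by omega
    rw [pvTrimLo]
    rw [dif_pos hlt, List.getD_eq_getElem l ' ' hlt, List.drop_eq_getElem_cons hlt,
        List.takeWhile_cons]
    by_cases hc : pvStripC l[lo]
    · rw [if_pos hc, if_pos hc, ih (lo + 1) (by omega) (by omega)]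
      simp; omega
    · rw [if_neg hc, if_neg hc]
      simp

theorem pv_trimHi_eq (l : List Char) : ∀ (n lo hi : Nat), hi - lo = n → lo ≤ hi → hi ≤ l.length →
    pvTrimHi l lo hi = hi - min (hi - lo) (((l.take hi).reverse.takeWhile pvStripC).length) := by
  intro n
  induction n with
  | zero =>
    intro lo hi hn hlo hhi
    rw [pvTrimHi]
    have : ¬ lo < hi := by omega
    rw [dif_neg this]
    omega
  | succ m ih =>
    intro lo hi hn hlo hhi
    have hlt : lo < hi := by omega
    have hidx : hi - 1 < l.length := by omega
    have htake : l.take hi = l.take (hi - 1) ++ [l[hi - 1]] := by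
      conv_lhs => rw [show hi = (hi - 1) + 1 by omega]
      rw [List.take_add_one, List.getElem?_eq_getElem hidx]
      simp
    rw [pvTrimHi, dif_pos hlt, List.getD_eq_getElem l ' ' hidx, htake]
    rw [List.reverse_append]
    simp only [List.reverse_singleton, List.singleton_append, List.takeWhile_cons]
    by_cases hc : pvStripC l[hi - 1]
    · rw [if_pos hc, if_pos hc, ih lo (hi - 1) (by omega) (by omega) (by omega)]
      simp only [List.length_cons]
      omega
    · rw [if_neg hc, if_neg hc]
      simp

-- trimming [lo:hi] with the two-pointer loops equals Python's strip of the same list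
theorem pv_trim_eq_strip (w : List Char) :
    PySem.List.slice w (some ((pvTrimLo w 0 w.length : Nat) : Int))
      (some ((pvTrimHi w (pvTrimLo w 0 w.length) w.length : Nat) : Int))
    = PySem.Chars.stripChars w (" :,-\t".toList) := by
  have hp : (fun c => (" :,-\t".toList).contains c) = pvStripC := funext pv_stripC_eq
  have hk : pvTrimLo w 0 w.length = (w.takeWhile pvStripC).length := by
    rw [pv_trimLo_eq w (w.length - 0) 0 rfl (by omega)]
    simp
  have hkle : (w.takeWhile pvStripC).length ≤ w.length := (List.takeWhile_sublist pvStripC).length_le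
  have hdrop : w.drop (w.takeWhile pvStripC).length = w.dropWhile pvStripC :=
    (pv_dropWhile_eq_drop pvStripC w).symm
  have hdlen : (w.dropWhile pvStripC).length = w.length - (w.takeWhile pvStripC).length := by
    rw [← hdrop, List.length_drop]
  have hh : pvTrimHi w (w.takeWhile pvStripC).length w.length
      = w.length - min (w.length - (w.takeWhile pvStripC).length)
          ((w.reverse.takeWhile pvStripC).length) := by
    rw [pv_trimHi_eq w _ _ w.length rfl hkle (by omega), List.take_length]
  have hstrip : PySem.Chars.stripChars w (" :,-\t".toList)
      = ((w.dropWhile pvStripC).reverse.dropWhile pvStripC).reverse := by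
    show ((w.dropWhile (fun c => (" :,-\t".toList).contains c)).reverse.dropWhile
        (fun c => (" :,-\t".toList).contains c)).reverse = _
    rw [hp]
  have hrev : ((w.dropWhile pvStripC).reverse.dropWhile pvStripC).reverse
      = (w.dropWhile pvStripC).take ((w.dropWhile pvStripC).length
          - ((w.dropWhile pvStripC).reverse.takeWhile pvStripC).length) := by
    rw [pv_dropWhile_eq_drop pvStripC (w.dropWhile pvStripC).reverse, List.reverse_drop]
    simp
  rw [hk, hh, hstrip, hrev, PySem.List.slice_natCast, hdrop]
  by_cases hd : w.dropWhile pvStripC = []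
  · rw [hd]
    simp
  · have hhead : pvStripC ((w.dropWhile pvStripC).head hd) = false :=
      List.head_dropWhile_not pvStripC hd
    have hrdlt : ((w.dropWhile pvStripC).reverse.takeWhile pvStripC).length
        < (w.dropWhile pvStripC).length := by
      rcases Nat.lt_or_ge ((w.dropWhile pvStripC).reverse.takeWhile pvStripC).length
        (w.dropWhile pvStripC).length with h | h
      · exact h
      · exfalso
        have hle := (List.takeWhile_sublist pvStripC (l := (w.dropWhile pvStripC).reverse)).length_le
        have hlen' : ((w.dropWhile pvStripC).reverse.takeWhile pvStripC).length
            = (w.dropWhile pvStripC).reverse.length := by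
          simp only [List.length_reverse] at hle ⊢
          omega
        have heq : (w.dropWhile pvStripC).reverse.takeWhile pvStripC
            = (w.dropWhile pvStripC).reverse :=
          (List.takeWhile_prefix pvStripC).sublist.eq_of_length hlen'
        have hmem : (w.dropWhile pvStripC).head hd
            ∈ (w.dropWhile pvStripC).reverse.takeWhile pvStripC := by
          rw [heq, List.mem_reverse]
          exact List.head_mem hd
        have := List.mem_takeWhile_imp hmem
        rw [hhead] at this
        exact absurd this (by simp)
    have hsplit : w.reverse = (w.dropWhile pvStripC).reverse ++ (w.takeWhile pvStripC).reverse := by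
      rw [← List.reverse_append, List.takeWhile_append_dropWhile]
    have hrun : (w.reverse.takeWhile pvStripC).length
        = ((w.dropWhile pvStripC).reverse.takeWhile pvStripC).length := by
      rw [hsplit, List.takeWhile_append]
      rw [if_neg (by simp only [List.length_reverse]; omega)]
    rw [hrun]
    have hmin : min (w.length - (w.takeWhile pvStripC).length)
        ((w.dropWhile pvStripC).reverse.takeWhile pvStripC).length
        = ((w.dropWhile pvStripC).reverse.takeWhile pvStripC).length := by omega
    rw [hmin]
    congr 1
    omega

-- ===== VERDICT (by name: the statement is the Claim_ definition above) =====
theorem window_value_py_spec : Claim_equal_window_value_py := by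
  intro text start max_chars _
  unfold Spec_window_value_py
  show window_value_py text start max_chars = window_value_py_alt text start max_chars
  simp only [window_value_py, window_value_py_alt, PySem.Str.find_eq]
  rw [show ("\n".toList) = ['\n'] from rfl, show (".".toList) = ['.'] from rfl,
      show (";".toList) = [';'] from rfl]
  rw [pv_endEq]
  refine Prod.ext rfl (Prod.ext rfl ?_)
  apply String.toList_injective
  rw [String.toList_ofList, PySem.Str.toList_stripChars]
  set w := (PySem.Str.slice text (some start)
    (some (pvCut (PySem.Str.slice text (some start)
      (some (min (PySem.Str.len text) (start + max_chars)))).toList start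
      (min (PySem.Str.len text) (start + max_chars))))).toList
  exact (pv_trim_eq_strip w).symm
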